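-- pv_equiv track=rewrite | github.com/technion-cs-nlp/vibe-testing-llms | src/vibe_testing/analysis/exporters.py | _preferred_column_order
-- ===== SOURCE A (Python) =====
-- from typing import Any, Dict, Iterable, List, Optional, Tuple
--
-- COUNT_COLUMNS = [
--     "sample_count",
--     "objective_count",
--     "subjective_count",
--     "both_score_count",
--     "coverage_ratio",
-- ]
--
-- def _preferred_column_order(
--     columns: Iterable[str],
--     include_variants: bool = True,
--     include_user_cols: bool = True,
-- ) -> List[str]:
--     """Produce a consistent ordering for CSV columns."""
--     existing = list(columns)
--     ordered: List[str] = []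
--
--     # Primary identifier columns (user_id first, then optional user_profile_type for reference)
--     if include_user_cols:
--         ordered.extend([col for col in ["user_id"] if col in existing])
--     ordered.extend([col for col in ["model_name"] if col in existing])
--     if include_variants:
--         ordered.extend([col for col in ["variant_label"] if col in existing])
--
--     ordered.extend([col for col in COUNT_COLUMNS if col in existing])
--     metric_means = sorted(
--         [col for col in existing if col.endswith("_mean") and col not in COUNT_COLUMNS]
--     )
--     metric_stds = sorted([col for col in existing if col.endswith("_std")])
--     delta_cols = sorted([col for col in existing if col.endswith("_delta")])
--
--     remainder = [
--         col
--         for col in existing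
--         if col not in ordered + metric_means + metric_stds + delta_cols
--     ]
--     return ordered + metric_means + metric_stds + delta_cols + remainder
-- ===== SOURCE B (Python) =====
-- COUNT_COLUMNS = [
--     "sample_count",
--     "objective_count",
--     "subjective_count",
--     "both_score_count",
--     "coverage_ratio",
-- ]
--
--
-- def _preferred_column_order(
--     columns,
--     include_variants=True,
--     include_user_cols=True,
-- ):
--     """Produce a consistent ordering for CSV columns (single classifying pass)."""
--     has_user = has_model = has_variant = False
--     counts = []
--     means = []
--     stds = []
--     deltas = []
--     rest = []
--     for col in columns:
--         if include_user_cols and col == "user_id":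
--             has_user = True
--         elif col == "model_name":
--             has_model = True
--         elif include_variants and col == "variant_label":
--             has_variant = True
--         elif col in COUNT_COLUMNS:
--             counts.append(col)
--         elif col.endswith("_mean"):
--             means.append(col)
--         elif col.endswith("_std"):
--             stds.append(col)
--         elif col.endswith("_delta"):
--             deltas.append(col)
--         else:
--             rest.append(col)
--     out = []
--     if has_user:
--         out.append("user_id")
--     if has_model:
--         out.append("model_name")
--     if has_variant:
--         out.append("variant_label")
--     out.extend(c for c in COUNT_COLUMNS if c in counts)
--     return out + sorted(means) + sorted(stds) + sorted(deltas) + rest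
-- ===== Notes on version B (the rewrite author's own statement) =====
-- stated objective: alternative
-- what changed: Replaces A's repeated whole-list membership scans (one per fixed/count column plus a quadratic 'col not in ordered+means+stds+deltas' remainder scan) by a single classifying pass that drops each column into one bucket (presence flags for the fixed columns, lists for counts/means/stds/deltas/rest), then concatenates the buckets.
import Mathlib
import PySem

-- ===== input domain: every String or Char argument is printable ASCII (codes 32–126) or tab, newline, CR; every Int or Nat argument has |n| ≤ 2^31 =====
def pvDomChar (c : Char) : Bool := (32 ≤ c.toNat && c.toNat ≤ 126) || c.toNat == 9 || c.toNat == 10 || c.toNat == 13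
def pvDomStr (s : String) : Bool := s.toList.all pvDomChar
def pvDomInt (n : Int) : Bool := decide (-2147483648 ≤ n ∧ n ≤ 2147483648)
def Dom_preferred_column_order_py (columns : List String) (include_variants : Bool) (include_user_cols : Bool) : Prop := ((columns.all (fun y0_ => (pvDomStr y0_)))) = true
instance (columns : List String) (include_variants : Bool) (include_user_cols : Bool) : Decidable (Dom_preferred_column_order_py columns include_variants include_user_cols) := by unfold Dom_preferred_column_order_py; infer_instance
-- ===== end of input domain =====

-- B replaces A's repeated membership scans over the whole column list by a single classifying
-- pass into buckets (presence flags for the fixed columns, lists for counts/means/stds/deltas/rest);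
-- objective: alternative decomposition.

-- ===== PORT A =====
def pvCountColumns : List String :=
  ["sample_count", "objective_count", "subjective_count", "both_score_count", "coverage_ratio"]

def preferred_column_order_py (columns : List String) (include_variants : Bool) (include_user_cols : Bool) : List String :=
  let existing := columns
  let ordered : List String := []
  let ordered := if include_user_cols then ordered ++ (["user_id"].filter (fun col => existing.contains col)) else ordered
  let ordered := ordered ++ (["model_name"].filter (fun col => existing.contains col))
  let ordered := if include_variants then ordered ++ (["variant_label"].filter (fun col => existing.contains col)) else ordered
  let ordered := ordered ++ (pvCountColumns.filter (fun col => existing.contains col))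
  let metric_means := PySem.List.sorted (existing.filter (fun col => PySem.Str.endswith col "_mean" && !(pvCountColumns.contains col))) (fun x => x) false
  let metric_stds := PySem.List.sorted (existing.filter (fun col => PySem.Str.endswith col "_std")) (fun x => x) false
  let delta_cols := PySem.List.sorted (existing.filter (fun col => PySem.Str.endswith col "_delta")) (fun x => x) false
  let remainder := existing.filter (fun col => !((ordered ++ metric_means ++ metric_stds ++ delta_cols).contains col))
  ordered ++ metric_means ++ metric_stds ++ delta_cols ++ remainder

-- ===== PORT B =====
structure PvBuckets where
  hasUser : Bool
  hasModel : Bool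
  hasVariant : Bool
  counts : List String
  means : List String
  stds : List String
  deltas : List String
  rest : List String
deriving Repr, DecidableEq

def pvStep (include_variants include_user_cols : Bool) (s : PvBuckets) (col : String) : PvBuckets :=
  if include_user_cols && col == "user_id" then { s with hasUser := true }
  else if col == "model_name" then { s with hasModel := true }
  else if include_variants && col == "variant_label" then { s with hasVariant := true }
  else if pvCountColumns.contains col then { s with counts := s.counts ++ [col] }
  else if PySem.Str.endswith col "_mean" then { s with means := s.means ++ [col] }
  else if PySem.Str.endswith col "_std" then { s with stds := s.stds ++ [col] }
  else if PySem.Str.endswith col "_delta" then { s with deltas := s.deltas ++ [col] }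
  else { s with rest := s.rest ++ [col] }

def preferred_column_order_py_alt (columns : List String) (include_variants : Bool) (include_user_cols : Bool) : List String :=
  let s := columns.foldl (pvStep include_variants include_user_cols) ⟨false, false, false, [], [], [], [], []⟩
  let out : List String := []
  let out := if s.hasUser then out ++ ["user_id"] else out
  let out := if s.hasModel then out ++ ["model_name"] else out
  let out := if s.hasVariant then out ++ ["variant_label"] else out
  let out := out ++ pvCountColumns.filter (fun c => s.counts.contains c)
  out ++ PySem.List.sorted s.means (fun x => x) false
      ++ PySem.List.sorted s.stds (fun x => x) false
      ++ PySem.List.sorted s.deltas (fun x => x) false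
      ++ s.rest

-- ===== PRECONDITION & SPEC =====
def Spec_preferred_column_order_py (columns : List String) (include_variants : Bool) (include_user_cols : Bool) (out : List String) : Prop := out = preferred_column_order_py_alt columns include_variants include_user_cols
instance (columns : List String) (include_variants : Bool) (include_user_cols : Bool) (out : List String) : Decidable (Spec_preferred_column_order_py columns include_variants include_user_cols out) := by unfold Spec_preferred_column_order_py; infer_instance

-- ===== CLAIM (what is proved, stated in full; the proofs are below) =====
def Claim_equal_preferred_column_order_py : Prop := ∀ (columns : List String) (include_variants : Bool) (include_user_cols : Bool), Dom_preferred_column_order_py columns include_variants include_user_cols → Spec_preferred_column_order_py columns include_variants include_user_cols (preferred_column_order_py columns include_variants include_user_cols)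

-- ===== LEMMAS AND PROOFS =====

-- A's bucket predicates (as they appear in port A)
def pvPMean (c : String) : Bool := PySem.Str.endswith c "_mean" && !(pvCountColumns.contains c)
def pvPStd (c : String) : Bool := PySem.Str.endswith c "_std"
def pvPDelta (c : String) : Bool := PySem.Str.endswith c "_delta"
def pvPRest (iv iu : Bool) (c : String) : Bool :=
  !(iu && c == "user_id") && !(c == "model_name") && !(iv && c == "variant_label") &&
  !(pvCountColumns.contains c) && !(PySem.Str.endswith c "_mean") &&
  !(PySem.Str.endswith c "_std") && !(PySem.Str.endswith c "_delta")

theorem pv_ends_disjoint (c : String) (p q : List Char) (hp : PySem.Chars.endswith c.toList p = true)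
    (hpq : ¬ p <:+ q) (hqp : ¬ q <:+ p) : PySem.Chars.endswith c.toList q = false := by
  rw [PySem.Chars.endswith_iff] at hp
  refine Bool.eq_false_iff.mpr ?_
  intro hq
  rw [PySem.Chars.endswith_iff] at hq
  rcases List.suffix_or_suffix_of_suffix hp hq with h | h
  · exact hpq h
  · exact hqp h

theorem pv_contains_filter (l : List String) (p : String → Bool) (a : String) (h : p a = true) :
    (l.filter p).contains a = l.contains a := by
  rw [Bool.eq_iff_iff]
  simp [List.mem_filter, h]

theorem pv_fold_char (iv iu : Bool) (columns : List String) (s : PvBuckets) :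
    columns.foldl (pvStep iv iu) s =
      ⟨s.hasUser || (iu && columns.contains "user_id"),
       s.hasModel || columns.contains "model_name",
       s.hasVariant || (iv && columns.contains "variant_label"),
       s.counts ++ columns.filter (fun c => pvCountColumns.contains c),
       s.means ++ columns.filter pvPMean,
       s.stds ++ columns.filter pvPStd,
       s.deltas ++ columns.filter pvPDelta,
       s.rest ++ columns.filter (pvPRest iv iu)⟩ := by
  induction columns generalizing s with
  | nil => cases s; simp
  | cons c cs ih =>
    rw [List.foldl_cons, pvStep, ih]
    by_cases h1 : (iu && c == "user_id") = true
    · obtain ⟨hiu, hc⟩ := Bool.and_eq_true_iff.mp h1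
      have hc' : c = "user_id" := by simpa using hc
      subst hc'
      simp [hiu, List.filter_cons, pvPMean, pvPStd, pvPDelta, pvPRest, pvCountColumns,
        PySem.Str.endswith, PySem.Chars.endswith] <;> decide
    · rw [if_neg h1]
      have h1' : ∀ b : Bool, (iu && (decide ("user_id" = c) || b)) = (iu && b) := by
        intro b
        cases hiu : iu
        · rfl
        · rw [hiu] at h1
          have : ¬ c = "user_id" := by simpa using h1
          simp [Ne.symm this]
      by_cases h2 : (c == "model_name") = true
      · have hc' : c = "model_name" := by simpa using h2
        subst hc'
        simp [List.filter_cons, pvPMean, pvPStd, pvPDelta, pvPRest, pvCountColumns,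
          PySem.Str.endswith, PySem.Chars.endswith] <;> decide
      · rw [if_neg h2]
        have h2' : decide ("model_name" = c) = false := by
          have : ¬ c = "model_name" := by simpa using h2
          simp [Ne.symm this]
        by_cases h3 : (iv && c == "variant_label") = true
        · obtain ⟨hiv, hc⟩ := Bool.and_eq_true_iff.mp h3
          have hc' : c = "variant_label" := by simpa using hc
          subst hc'
          simp [hiv, List.filter_cons, pvPMean, pvPStd, pvPDelta, pvPRest,
            pvCountColumns, PySem.Str.endswith, PySem.Chars.endswith] <;> decide
        · rw [if_neg h3]
          have h3' : ∀ b : Bool, (iv && (decide ("variant_label" = c) || b)) = (iv && b) := by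
            intro b
            cases hiv : iv
            · rfl
            · rw [hiv] at h3
              have : ¬ c = "variant_label" := by simpa using h3
              simp [Ne.symm this]
          by_cases h4 : pvCountColumns.contains c = true
          · have hmem : c ∈ pvCountColumns := by simpa using h4
            have hends : PySem.Str.endswith c "_mean" = false ∧ PySem.Str.endswith c "_std" = false ∧
                PySem.Str.endswith c "_delta" = false := by
              fin_cases hmem <;> exact ⟨by decide, by decide, by decide⟩
            have he1 : PySem.Chars.endswith c.toList ['_','m','e','a','n'] = false := by
              simpa using hends.1
            have he2 : PySem.Chars.endswith c.toList ['_','s','t','d'] = false := by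
              simpa using hends.2.1
            have he3 : PySem.Chars.endswith c.toList ['_','d','e','l','t','a'] = false := by
              simpa using hends.2.2
            simp [h1', h2', h3', hmem, pvPMean, pvPStd, pvPDelta, pvPRest,
              he1, he2, he3]
          · rw [if_neg h4]
            by_cases h5 : PySem.Str.endswith c "_mean" = true
            · have hstd : PySem.Str.endswith c "_std" = false := by
                simp only [PySem.Str.endswith_eq] at h5 ⊢
                exact pv_ends_disjoint c "_mean".toList "_std".toList h5 (by decide) (by decide)
              have hdel : PySem.Str.endswith c "_delta" = false := by
                simp only [PySem.Str.endswith_eq] at h5 ⊢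
                exact pv_ends_disjoint c "_mean".toList "_delta".toList h5 (by decide) (by decide)
              have h4' : c ∉ pvCountColumns := by simpa using h4
              have h5c : PySem.Chars.endswith c.toList ['_','m','e','a','n'] = true := by simpa using h5
              have hstdc : PySem.Chars.endswith c.toList ['_','s','t','d'] = false := by simpa using hstd
              have hdelc : PySem.Chars.endswith c.toList ['_','d','e','l','t','a'] = false := by simpa using hdel
              simp [h1', h2', h3', h4', h5c, pvPMean, pvPStd, pvPDelta, pvPRest,
                hstdc, hdelc]
            · rw [if_neg h5]
              by_cases h6 : PySem.Str.endswith c "_std" = true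
              · have hdel : PySem.Str.endswith c "_delta" = false := by
                  simp only [PySem.Str.endswith_eq] at h6 ⊢
                  exact pv_ends_disjoint c "_std".toList "_delta".toList h6 (by decide) (by decide)
                have h4' : c ∉ pvCountColumns := by simpa using h4
                have h5c : PySem.Chars.endswith c.toList ['_','m','e','a','n'] = false := by
                  simpa using Bool.eq_false_iff.mpr h5
                have h6c : PySem.Chars.endswith c.toList ['_','s','t','d'] = true := by simpa using h6
                have hdelc : PySem.Chars.endswith c.toList ['_','d','e','l','t','a'] = false := by
                  simpa using hdel
                simp [h1', h2', h3', h4', h5c, h6c, pvPMean, pvPStd, pvPDelta,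
                  pvPRest, hdelc]
              · rw [if_neg h6]
                by_cases h7 : PySem.Str.endswith c "_delta" = true
                · have h4' : c ∉ pvCountColumns := by simpa using h4
                  have h5c : PySem.Chars.endswith c.toList ['_','m','e','a','n'] = false := by
                    simpa using Bool.eq_false_iff.mpr h5
                  have h6c : PySem.Chars.endswith c.toList ['_','s','t','d'] = false := by
                    simpa using Bool.eq_false_iff.mpr h6
                  have h7c : PySem.Chars.endswith c.toList ['_','d','e','l','t','a'] = true := by
                    simpa using h7
                  simp [h1', h2', h3', h4', h5c, h6c, h7c, pvPMean, pvPStd,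
                    pvPDelta, pvPRest]
                · rw [if_neg h7]
                  have h4' : c ∉ pvCountColumns := by simpa using h4
                  have h5c : PySem.Chars.endswith c.toList ['_','m','e','a','n'] = false := by
                    simpa using Bool.eq_false_iff.mpr h5
                  have h6c : PySem.Chars.endswith c.toList ['_','s','t','d'] = false := by
                    simpa using Bool.eq_false_iff.mpr h6
                  have h7c : PySem.Chars.endswith c.toList ['_','d','e','l','t','a'] = false := by
                    simpa using Bool.eq_false_iff.mpr h7
                  simp [h1', h2', h3', h4', h5c, h6c, h7c, List.filter_cons, pvPMean, pvPStd,
                    pvPDelta, pvPRest, h1, h2, h3]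

-- the remainder predicates agree pointwise on members of `columns`
theorem pv_remainder_eq (columns : List String) (iv iu : Bool) :
    columns.filter (fun col =>
        !((((if iu then ([] : List String) ++ (["user_id"].filter (fun c => columns.contains c)) else []) ++
            (["model_name"].filter (fun c => columns.contains c)) ++
            (if iv then ["variant_label"].filter (fun c => columns.contains c) else []) ++
            pvCountColumns.filter (fun c => columns.contains c)) ++
           PySem.List.sorted (columns.filter pvPMean) (fun x => x) false ++
           PySem.List.sorted (columns.filter pvPStd) (fun x => x) false ++
           PySem.List.sorted (columns.filter pvPDelta) (fun x => x) false).contains col)) =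
      columns.filter (pvPRest iv iu) := by
  apply List.filter_congr
  intro c hc
  rw [Bool.eq_iff_iff]
  simp only [Bool.not_eq_eq_eq_not, Bool.not_true, Bool.not_eq_true', ← Bool.not_eq_true,
    List.contains_eq_mem, decide_eq_true_eq, List.mem_append, pvPRest, pvPMean, pvPStd, pvPDelta,
    List.mem_filter, PySem.List.mem_sorted, Bool.and_eq_true, Bool.not_eq_true',
    List.mem_singleton, List.mem_ite_nil_left, List.mem_ite_nil_right, beq_iff_eq]
  tauto

theorem pvPMean_eq : pvPMean = fun c => PySem.Chars.endswith c.toList ['_','m','e','a','n'] && !decide (c ∈ pvCountColumns) := by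
  funext c; simp [pvPMean]

theorem pvPStd_eq : pvPStd = fun c => PySem.Chars.endswith c.toList ['_','s','t','d'] := by
  funext c; simp [pvPStd]

theorem pvPDelta_eq : pvPDelta = fun c => PySem.Chars.endswith c.toList ['_','d','e','l','t','a'] := by
  funext c; simp [pvPDelta]

theorem pvPRest_eq (iv iu : Bool) : pvPRest iv iu = fun c =>
    !(iu && decide (c = "user_id")) && !(decide (c = "model_name")) &&
    !(iv && decide (c = "variant_label")) && !(decide (c ∈ pvCountColumns)) &&
    !(PySem.Chars.endswith c.toList ['_','m','e','a','n']) &&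
    !(PySem.Chars.endswith c.toList ['_','s','t','d']) &&
    !(PySem.Chars.endswith c.toList ['_','d','e','l','t','a']) := by
  funext c; simp [pvPRest, Bool.and_assoc, Bool.beq_eq_decide_eq]

-- ===== VERDICT (by name: the statement is the Claim_ definition above) =====
theorem preferred_column_order_py_spec : Claim_equal_preferred_column_order_py := by
  intro columns iv iu _
  unfold Spec_preferred_column_order_py
  have hcounts : pvCountColumns.filter
      (fun c => (List.filter (fun c => pvCountColumns.contains c) columns).contains c) =
      pvCountColumns.filter (fun c => columns.contains c) := by
    apply List.filter_congr
    intro c hcm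
    exact pv_contains_filter _ _ _ (by simpa using hcm)
  have hrem := pv_remainder_eq columns iv iu
  simp only [preferred_column_order_py, preferred_column_order_py_alt, pv_fold_char]
  cases iu <;> cases iv <;>
    by_cases hu : columns.contains "user_id" = true <;>
    by_cases hm : columns.contains "model_name" = true <;>
    by_cases hv : columns.contains "variant_label" = true <;>
    simp_all [List.filter, List.append_assoc, pvPMean_eq, pvPStd_eq, pvPDelta_eq, pvPRest_eq]
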